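-- pv_equiv track=rewrite | github.com/aditya4232/ALD-01 | src/ald01/core/reasoning.py | _select_strategy
-- ===== SOURCE A (Python) =====
-- def _select_strategy(query: str, depth: int) -> str:
--     """Auto-select the best reasoning strategy."""
--     query_lower = query.lower()
--
--     # Complex problem indicators
--     if any(w in query_lower for w in ["compare", "pros and cons", "trade-off", "versus", "which is better"]):
--         return "tree_of_thought"
--     if any(w in query_lower for w in ["step by step", "how to", "explain", "walk me through"]):
--         return "chain_of_thought"
--     if any(w in query_lower for w in ["improve", "better", "optimize", "refactor", "review"]):
--         return "reflexion"
--     if any(w in query_lower for w in ["build", "create", "implement", "design", "architect"]):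
--         return "decompose"
--
--     # Depth-based fallback
--     if depth >= 7:
--         return "tree_of_thought"
--     elif depth >= 4:
--         return "chain_of_thought"
--     return "chain_of_thought"
-- ===== SOURCE B (Python) =====
-- KEYWORD_PRIORITY = [
--     ("compare", 0), ("pros and cons", 0), ("trade-off", 0), ("versus", 0), ("which is better", 0),
--     ("step by step", 1), ("how to", 1), ("explain", 1), ("walk me through", 1),
--     ("improve", 2), ("better", 2), ("optimize", 2), ("refactor", 2), ("review", 2),
--     ("build", 3), ("create", 3), ("implement", 3), ("design", 3), ("architect", 3),
-- ]
--
-- STRATEGIES = ["tree_of_thought", "chain_of_thought", "reflexion", "decompose"]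
--
--
-- def _select_strategy(query: str, depth: int) -> str:
--     """Single pass over all keywords: keep the minimum priority of any match."""
--     query_lower = query.lower()
--     best = None
--     for kw, p in KEYWORD_PRIORITY:
--         if kw in query_lower:
--             best = p if best is None else min(best, p)
--     if best is not None:
--         return STRATEGIES[best]
--     return "tree_of_thought" if depth >= 7 else "chain_of_thought"
-- ===== Notes on version B (the rewrite author's own statement) =====
-- stated objective: alternative
-- what changed: Replaced the four staged early-return any() branches by one flat pass over all (keyword, priority) pairs that folds a minimum-priority accumulator and indexes a strategy table at the end; the redundant depth>=4 fallback branch is collapsed into one conditional.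
import Mathlib
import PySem

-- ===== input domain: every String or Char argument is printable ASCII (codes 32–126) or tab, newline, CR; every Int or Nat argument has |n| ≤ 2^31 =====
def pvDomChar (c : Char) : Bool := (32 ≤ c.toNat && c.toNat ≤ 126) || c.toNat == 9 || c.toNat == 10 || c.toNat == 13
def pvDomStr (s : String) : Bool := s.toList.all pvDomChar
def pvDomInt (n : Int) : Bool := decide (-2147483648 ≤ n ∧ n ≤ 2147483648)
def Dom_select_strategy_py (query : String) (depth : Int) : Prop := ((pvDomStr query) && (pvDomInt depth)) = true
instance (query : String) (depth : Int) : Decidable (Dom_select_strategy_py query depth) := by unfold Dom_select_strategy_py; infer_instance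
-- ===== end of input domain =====

-- B replaces A's staged early-return branches by one flat min-priority fold over all
-- (keyword, priority) pairs, indexing a strategy table at the end; objective: alternative.

-- ===== PORT A =====
-- literal transliteration of A: lower once, four if-branches with any(w in ql for w in [...]),
-- then the depth-based fallback with its redundant depth >= 4 branch.
def select_strategy_py (query : String) (depth : Int) : String :=
  let query_lower := PySem.Str.lower query
  if (["compare", "pros and cons", "trade-off", "versus", "which is better"] : List String).any
      (fun w => PySem.Str.isIn w query_lower) then "tree_of_thought"
  else if (["step by step", "how to", "explain", "walk me through"] : List String).any
      (fun w => PySem.Str.isIn w query_lower) then "chain_of_thought"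
  else if (["improve", "better", "optimize", "refactor", "review"] : List String).any
      (fun w => PySem.Str.isIn w query_lower) then "reflexion"
  else if (["build", "create", "implement", "design", "architect"] : List String).any
      (fun w => PySem.Str.isIn w query_lower) then "decompose"
  else if depth ≥ 7 then "tree_of_thought"
  else if depth ≥ 4 then "chain_of_thought"
  else "chain_of_thought"

-- ===== PORT B =====
-- the module-level tables of Source B
def pvKeywordPriority : List (String × Nat) :=
  [ ("compare", 0), ("pros and cons", 0), ("trade-off", 0), ("versus", 0), ("which is better", 0)
  , ("step by step", 1), ("how to", 1), ("explain", 1), ("walk me through", 1)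
  , ("improve", 2), ("better", 2), ("optimize", 2), ("refactor", 2), ("review", 2)
  , ("build", 3), ("create", 3), ("implement", 3), ("design", 3), ("architect", 3) ]

def pvStrategies : List String := ["tree_of_thought", "chain_of_thought", "reflexion", "decompose"]

-- the loop body: 'if kw in ql: best = p if best is None else min(best, p)'
def pvStep (ql : String) (best : Option Nat) (e : String × Nat) : Option Nat :=
  if PySem.Str.isIn e.1 ql then
    some (match best with | none => e.2 | some q => min q e.2)
  else best

def select_strategy_py_alt (query : String) (depth : Int) : String :=
  let query_lower := PySem.Str.lower query
  match pvKeywordPriority.foldl (pvStep query_lower) none with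
  | some p => pvStrategies.getD p "chain_of_thought"
  | none => if depth ≥ 7 then "tree_of_thought" else "chain_of_thought"

-- ===== PRECONDITION & SPEC =====
def Spec_select_strategy_py (query : String) (depth : Int) (out : String) : Prop := out = select_strategy_py_alt query depth
instance (query : String) (depth : Int) (out : String) : Decidable (Spec_select_strategy_py query depth out) := by unfold Spec_select_strategy_py; infer_instance

-- ===== CLAIM (what is proved, stated in full; the proofs are below) =====
def Claim_equal_select_strategy_py : Prop := ∀ (query : String) (depth : Int), Dom_select_strategy_py query depth → Spec_select_strategy_py query depth (select_strategy_py query depth)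

-- ===== LEMMAS AND PROOFS =====

-- abstract merge step (definitionally the accumulator update for a whole group)
def pvMrg (acc : Option Nat) (b : Bool) (p : Nat) : Option Nat :=
  if b = true then some (match acc with | none => p | some q => min q p) else acc

-- folding one constant-priority group with an arbitrary match predicate m
theorem pvGen_foldl_group (m : String → Bool) (p : Nat) (kws : List String) (acc : Option Nat) :
    (kws.map (fun k => (k, p))).foldl
      (fun best e => if m e.1 = true then some (match best with | none => e.2 | some q => min q e.2) else best) acc
    = pvMrg acc (kws.any m) p := by
  induction kws generalizing acc with
  | nil => simp [pvMrg]
  | cons k kws ih =>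
    simp only [List.map_cons, List.foldl_cons, List.any_cons]
    cases hk : m k with
    | false => simp only [hk, Bool.false_eq_true, if_false, Bool.false_or]; exact ih acc
    | true =>
      simp only [hk, Bool.true_or, reduceIte]
      rw [ih]
      by_cases h2 : kws.any m = true
      · cases acc <;> simp [pvMrg, h2]
      · simp only [Bool.not_eq_true] at h2
        cases acc <;> simp [pvMrg, h2]

-- the same statement for the concrete loop body pvStep (defeq to the generic one)
theorem pvStep_foldl_group (ql : String) (p : Nat) (kws : List String) (acc : Option Nat) :
    (kws.map (fun k => (k, p))).foldl (pvStep ql) acc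
      = pvMrg acc (kws.any fun w => PySem.Str.isIn w ql) p :=
  pvGen_foldl_group (fun w => PySem.Str.isIn w ql) p kws acc

-- the two result shapes agree for every combination of the four group-match booleans
theorem pvBridge (b0 b1 b2 b3 : Bool) (d : Int) :
    (if b0 = true then "tree_of_thought"
     else if b1 = true then "chain_of_thought"
     else if b2 = true then "reflexion"
     else if b3 = true then "decompose"
     else if d ≥ 7 then "tree_of_thought"
     else if d ≥ 4 then "chain_of_thought"
     else "chain_of_thought") =
    (match pvMrg (pvMrg (pvMrg (pvMrg none b0 0) b1 1) b2 2) b3 3 with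
     | some p => pvStrategies.getD p "chain_of_thought"
     | none => if d ≥ 7 then "tree_of_thought" else "chain_of_thought") := by
  cases b0 <;> cases b1 <;> cases b2 <;> cases b3 <;>
    first
      | rfl
      | simp [pvMrg, pvStrategies]

theorem select_strategy_py_spec_aux (query : String) (depth : Int) :
    select_strategy_py query depth = select_strategy_py_alt query depth := by
  have hsplit : pvKeywordPriority =
      ((["compare", "pros and cons", "trade-off", "versus", "which is better"] : List String).map (fun k => (k, 0)))
      ++ ((["step by step", "how to", "explain", "walk me through"] : List String).map (fun k => (k, 1)))
      ++ ((["improve", "better", "optimize", "refactor", "review"] : List String).map (fun k => (k, 2)))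
      ++ ((["build", "create", "implement", "design", "architect"] : List String).map (fun k => (k, 3))) := rfl
  simp only [select_strategy_py, select_strategy_py_alt, hsplit]
  rw [List.foldl_append, List.foldl_append, List.foldl_append]
  rw [pvStep_foldl_group, pvStep_foldl_group, pvStep_foldl_group, pvStep_foldl_group]
  exact pvBridge _ _ _ _ depth

-- ===== VERDICT (by name: the statement is the Claim_ definition above) =====
theorem select_strategy_py_spec : Claim_equal_select_strategy_py := by
  intro query depth _
  unfold Spec_select_strategy_py
  exact select_strategy_py_spec_aux query depth
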